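-- pv_equiv track=rewrite | github.com/tardieu/torch-spyre | torch_spyre/_inductor/core_division.py | multi_dim_core_split
-- ===== SOURCE A (Python) =====
-- def core_split(size: int, max_cores: int) -> int:
--     """
--     Find the largest divisor of size that doesn't exceed max_cores.
--
--     Args:
--         size: The dimension size to split
--         max_cores: Maximum number of cores to use for this dimension
--
--     Returns:
--         Number of cores to use (always divides size evenly)
--     """
--     for i in range(max_cores, 0, -1):
--         if size % i == 0:
--             return i
--     return 1
--
-- def multi_dim_core_split(
--     sizes: list[int], max_cores: int, priorities: list[int] | None = None
-- ) -> list[int]: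
--     """
--     Distribute max_cores across multiple dimensions optimally.
--
--     This function tries to split cores across multiple dimensions to maximize
--     parallelism while ensuring even division. It uses a greedy approach that
--     prioritizes dimensions based on:
--     1. User-specified priorities (if provided)
--     2. Dimension size (larger dimensions get priority)
--     3. Divisibility (dimensions that divide evenly get priority)
--
--     Dimensions with negative priorities are excluded from splitting and will
--     always have a split value of 1.
--
--     Args:
--         sizes: List of dimension sizes that can be parallelized
--         max_cores: Total number of cores available
--         priorities: Optional list of priority values (higher = more important)
--                    If None, uses dimension sizes as priorities.
--                    Use negative values to exclude dimensions from splitting.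
--
--     Returns:
--         List of core splits for each dimension (same length as sizes)
--         The product of all splits will be <= max_cores
--
--     Example:
--         >>> multi_dim_core_split([128, 64, 32], max_cores=8)
--         [4, 2, 1]  # 4*2*1 = 8 cores total
--
--         >>> multi_dim_core_split([100, 50], max_cores=10)
--         [5, 2]  # 5*2 = 10 cores total
--
--         >>> multi_dim_core_split([128, 64, 32], max_cores=8, priorities=[3, -1, 2])
--         [4, 1, 2]  # Middle dimension excluded from splitting (priority=-1)
--     """
--     if not sizes:
--         return []
--
--     n_dims = len(sizes)
--     splits = [1] * n_dims
--
--     # Use provided priorities or default to the sizes of dimensions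
--     if priorities is None:
--         priorities = sizes.copy()
--
--     # Create list of (dimension_index, size, priority) tuples
--     # Filter out dimensions with negative priorities (they should not be split)
--     dim_info = [
--         (i, sizes[i], priorities[i]) for i in range(n_dims) if priorities[i] >= 0
--     ]
--
--     # Sort by priority (descending), then by size (descending)
--     dim_info.sort(key=lambda x: (x[2], x[1]), reverse=True)
--
--     n_cores_to_split = max_cores
--
--     # Greedy allocation: try to split highest priority dimensions first
--     for dim_idx, size, _ in dim_info:
--         if n_cores_to_split <= 1:
--             break
--
--         # Find the best split for this dimension given n_cores_to_split
--         best_split = core_split(size, n_cores_to_split)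
--
--         if best_split > 1:
--             splits[dim_idx] = best_split
--             n_cores_to_split = n_cores_to_split // best_split
--
--     return splits
-- ===== SOURCE B (Python) =====
-- def _largest_divisor(size, cap):
--     """Largest divisor of |size| that is <= cap (1 if none, cap if size == 0),
--     found by enumerating divisor pairs up to sqrt(|size|)."""
--     if cap <= 0:
--         return 1
--     s = -size if size < 0 else size
--     if s == 0:
--         return cap
--     if s <= cap:
--         return s
--     best = 1
--     d = 1
--     while d * d <= s:
--         if s % d == 0:
--             if d <= cap and d > best:
--                 best = d
--             q = s // d
--             if q <= cap and q > best:
--                 best = q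
--         d += 1
--     return best
--
--
-- def multi_dim_core_split(sizes, max_cores, priorities=None):
--     if not sizes:
--         return []
--     n = len(sizes)
--     pri = sizes if priorities is None else priorities
--     order = sorted((i for i in range(n) if pri[i] >= 0),
--                    key=lambda i: (pri[i], sizes[i]), reverse=True)
--     assigned = {}
--     remaining = max_cores
--     for i in order:
--         if remaining <= 1:
--             break
--         d = _largest_divisor(sizes[i], remaining)
--         if d > 1:
--             assigned[i] = d
--             remaining //= d
--     return [assigned.get(i, 1) for i in range(n)]
-- ===== Notes on version B (the rewrite author's own statement) =====
-- stated objective: alternative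
-- what changed: The per-dimension divisor search enumerates divisor pairs up to sqrt(size) instead of counting down from the remaining core budget, and the greedy loop records chosen splits in a dict expanded to the output list at the end instead of mutating a preallocated list.
-- outside the precondition, e.g. on multi_dim_core_split([4, 2], 3, [1]): A raises IndexError, B raises IndexError
import Mathlib
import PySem

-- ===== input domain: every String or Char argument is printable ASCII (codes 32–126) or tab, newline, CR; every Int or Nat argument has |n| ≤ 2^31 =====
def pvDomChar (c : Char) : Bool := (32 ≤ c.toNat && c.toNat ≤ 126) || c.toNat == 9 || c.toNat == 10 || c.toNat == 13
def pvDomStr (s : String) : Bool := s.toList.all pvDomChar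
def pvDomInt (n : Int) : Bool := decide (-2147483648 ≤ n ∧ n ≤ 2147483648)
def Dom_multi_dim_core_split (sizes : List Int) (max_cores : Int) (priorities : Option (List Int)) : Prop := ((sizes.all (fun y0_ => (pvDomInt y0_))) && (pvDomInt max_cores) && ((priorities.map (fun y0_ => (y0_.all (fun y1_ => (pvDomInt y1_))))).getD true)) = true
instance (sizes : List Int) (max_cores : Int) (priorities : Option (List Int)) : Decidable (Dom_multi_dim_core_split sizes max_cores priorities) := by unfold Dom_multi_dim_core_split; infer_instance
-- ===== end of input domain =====

-- B finds each dimension's split by enumerating divisor pairs up to sqrt(size) instead of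
-- A's downward scan from max_cores, and collects chosen splits in a dict instead of
-- mutating a preallocated list (alternative algorithm; not measured faster).

-- ===== PORT A =====
-- for i in range(max_cores, 0, -1): if size % i == 0: return i;  return 1
-- (the countdown loop as recursion on the trip count, stopping at the first divisor)
def coreSplitLoop (size : Int) : Nat -> Int -> Int
  | 0, _ => 1
  | fuel+1, i =>
    if 0 < i then
      if PySem.Int.mod size i == 0 then i else coreSplitLoop size fuel (i - 1)
    else 1

def core_split (size : Int) (max_cores : Int) : Int :=
  coreSplitLoop size max_cores.toNat max_cores

-- the greedy for-loop over dim_info, with its break, threading (splits, n_cores_to_split)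
def aLoop (dim_info : List (Int × Int × Int)) (splits : List Int) (n : Int) : List Int × Int :=
  match dim_info with
  | [] => (splits, n)
  | t :: rest =>
    if n ≤ 1 then (splits, n)
    else
      let best := core_split t.2.1 n
      if 1 < best then aLoop rest (PySem.List.pySetD splits t.1 best) (PySem.Int.floordiv n best)
      else aLoop rest splits n

def multi_dim_core_split (sizes : List Int) (max_cores : Int) (priorities : Option (List Int)) : List Int :=
  if sizes = [] then []
  else
    let n_dims : Int := PySem.List.len sizes
    let splits : List Int := PySem.List.pyRepeat [1] n_dims
    let pri : List Int := priorities.getD sizes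
    let dim_info : List (Int × Int × Int) :=
      ((PySem.List.pyRange 0 n_dims 1).filter (fun i => decide (0 ≤ PySem.List.pyGetD pri i 0))).map
        (fun i => (i, PySem.List.pyGetD sizes i 0, PySem.List.pyGetD pri i 0))
    let sorted_info := PySem.List.sorted2 dim_info (fun x => x.2.2) (fun x => x.2.1) true
    (aLoop sorted_info splits max_cores).1

-- ===== PORT B =====
-- while d*d <= s loop of _largest_divisor, with fuel as a totality guard
def divLoop (s : Int) (cap : Int) : Nat → Int → Int → Int
  | 0, _, best => best
  | fuel+1, d, best =>
    if d * d ≤ s then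
      let best1 :=
        if PySem.Int.mod s d == 0 then
          let b2 := if d ≤ cap ∧ best < d then d else best
          let q := PySem.Int.floordiv s d
          if q ≤ cap ∧ b2 < q then q else b2
        else best
      divLoop s cap fuel (d + 1) best1
    else best

def largest_divisor (size : Int) (cap : Int) : Int :=
  if cap ≤ 0 then 1
  else
    let s := if size < 0 then -size else size
    if s = 0 then cap
    else if s ≤ cap then s
    else divLoop s cap (s.toNat + 1) 1 1

-- B's greedy loop over the sorted index list, accumulating {index: split}
def bLoop (sizes : List Int) (order : List Int) (assigned : PySem.Dict Int Int) (remaining : Int) :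
    PySem.Dict Int Int × Int :=
  match order with
  | [] => (assigned, remaining)
  | i :: rest =>
    if remaining ≤ 1 then (assigned, remaining)
    else
      let d := largest_divisor (PySem.List.pyGetD sizes i 0) remaining
      if 1 < d then bLoop sizes rest (assigned.insert i d) (PySem.Int.floordiv remaining d)
      else bLoop sizes rest assigned remaining

def multi_dim_core_split_alt (sizes : List Int) (max_cores : Int) (priorities : Option (List Int)) : List Int :=
  if sizes = [] then []
  else
    let n : Int := PySem.List.len sizes
    let pri : List Int := priorities.getD sizes
    let order : List Int := PySem.List.sorted2
      ((PySem.List.pyRange 0 n 1).filter (fun i => decide (0 ≤ PySem.List.pyGetD pri i 0)))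
      (fun i => PySem.List.pyGetD pri i 0) (fun i => PySem.List.pyGetD sizes i 0) true
    let st := bLoop sizes order PySem.Dict.empty max_cores
    (PySem.List.pyRange 0 n 1).map (fun i => st.1.getD i 1)

-- ===== PRECONDITION & SPEC =====
-- Pre_ excludes only the inputs where an explicit priorities list is shorter than sizes,
-- on which A raises IndexError (priorities[i]).
def Pre_multi_dim_core_split (sizes : List Int) (max_cores : Int) (priorities : Option (List Int)) : Prop :=
  sizes.length ≤ (priorities.getD sizes).length
instance (sizes : List Int) (max_cores : Int) (priorities : Option (List Int)) : Decidable (Pre_multi_dim_core_split sizes max_cores priorities) := by unfold Pre_multi_dim_core_split; infer_instance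

def pvWitness_multi_dim_core_split : List Int × Int × Option (List Int) := ([6, 4], 4, none)

def Spec_multi_dim_core_split (sizes : List Int) (max_cores : Int) (priorities : Option (List Int)) (out : List Int) : Prop := out = multi_dim_core_split_alt sizes max_cores priorities
instance (sizes : List Int) (max_cores : Int) (priorities : Option (List Int)) (out : List Int) : Decidable (Spec_multi_dim_core_split sizes max_cores priorities out) := by unfold Spec_multi_dim_core_split; infer_instance

-- ===== CLAIM (what is proved, stated in full; the proofs are below) =====
def Claim_equal_multi_dim_core_split : Prop := ∀ (sizes : List Int) (max_cores : Int) (priorities : Option (List Int)), Dom_multi_dim_core_split sizes max_cores priorities → Pre_multi_dim_core_split sizes max_cores priorities → Spec_multi_dim_core_split sizes max_cores priorities (multi_dim_core_split sizes max_cores priorities)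

-- ===== LEMMAS AND PROOFS =====

theorem pvWitness_ok :
    Dom_multi_dim_core_split pvWitness_multi_dim_core_split.1 pvWitness_multi_dim_core_split.2.1 pvWitness_multi_dim_core_split.2.2 ∧
    Pre_multi_dim_core_split pvWitness_multi_dim_core_split.1 pvWitness_multi_dim_core_split.2.1 pvWitness_multi_dim_core_split.2.2 := by
  decide

-- inserting mapped elements commutes with map when the comparator factors through f
theorem insertBy_map {α β : Type} (f : α → β) (bef : α → α → Bool) (bef' : β → β → Bool)
    (h : ∀ a b, bef' (f a) (f b) = bef a b) (x : α) :
    ∀ ys : List α, PySem.List.insertBy bef' (f x) (ys.map f) = (PySem.List.insertBy bef x ys).map f := by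
  intro ys
  induction ys with
  | nil => simp [PySem.List.insertBy]
  | cons y ys ih =>
    simp only [List.map_cons, PySem.List.insertBy, h]
    by_cases hb : bef x y
    · simp [hb]
    · simp [hb, ih]

theorem foldl_insertBy_map {α β : Type} (f : α → β) (bef : α → α → Bool) (bef' : β → β → Bool)
    (h : ∀ a b, bef' (f a) (f b) = bef a b) :
    ∀ (xs acc : List α),
      (xs.map f).foldl (fun acc x => PySem.List.insertBy bef' x acc) (acc.map f)
        = (xs.foldl (fun acc x => PySem.List.insertBy bef x acc) acc).map f := by
  intro xs
  induction xs with
  | nil => simp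
  | cons x xs ih =>
    intro acc
    simp only [List.map_cons, List.foldl_cons]
    rw [insertBy_map f bef bef' h, ih]

theorem sorted2_map {α β : Type} (f : α → β) (k1 : α → Int) (k2 : α → Int)
    (k1' : β → Int) (k2' : β → Int)
    (h1 : ∀ a, k1' (f a) = k1 a) (h2 : ∀ a, k2' (f a) = k2 a) (xs : List α) :
    PySem.List.sorted2 (xs.map f) k1' k2' true = (PySem.List.sorted2 xs k1 k2 true).map f := by
  simp only [PySem.List.sorted2]
  exact foldl_insertBy_map f _ _ (by intro a b; simp [h1, h2]) xs []

theorem cs_desc (s m : Int) (hm : 0 < m) (hp : PySem.Int.mod s m = 0) :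
    ∀ (k : Nat) (c : Int), c = m + k →
    (∀ j, m < j → j ≤ c → ¬ (PySem.Int.mod s j = 0)) →
    coreSplitLoop s c.toNat c = m := by
  intro k
  induction k with
  | zero =>
    intro c hc _
    have hceq : c = m := by omega
    subst hceq
    have h1 : c.toNat = (c.toNat - 1) + 1 := by omega
    rw [h1]
    simp [coreSplitLoop, hm]
    intro h
    exact absurd ((PySem.Int.mod_eq_zero_iff_dvd s c).mp hp) h
  | succ k ih =>
    intro c hc hno
    have h0c : (0:Int) < c := by omega
    have hnc : ¬ PySem.Int.mod s c = 0 := hno c (by omega) le_rfl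
    have h1 : c.toNat = (c - 1).toNat + 1 := by omega
    rw [h1]
    simp only [coreSplitLoop, if_pos h0c, if_neg (by simp [hnc] : ¬ ((PySem.Int.mod s c == 0) = true))]
    exact ih (c - 1) (by omega) (fun j ha hb => hno j ha (by omega))

theorem divLoop_spec (t c : Int) (ht : 0 < t) (hc : 0 < c) :
    ∀ (fuel : Nat) (d best : Int), 0 < d →
    (t + 1 - d).toNat ≤ fuel →
    0 < best → best ≤ c → best ∣ t →
    (∀ j, 0 < j → j ≤ c → j ∣ t → (j < d ∨ t / j < d) → j ≤ best) →
    0 < divLoop t c fuel d best ∧ divLoop t c fuel d best ≤ c ∧ divLoop t c fuel d best ∣ t ∧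
      ∀ j, 0 < j → j ≤ c → j ∣ t → j ≤ divLoop t c fuel d best := by
  intro fuel
  induction fuel with
  | zero =>
    intro d best hd hfuel hb0 hbc hbt H
    have hdt : t < d := by omega
    refine ⟨hb0, hbc, hbt, fun j hj0 hjc hjt => ?_⟩
    exact H j hj0 hjc hjt (Or.inl (lt_of_le_of_lt (Int.le_of_dvd ht hjt) hdt))
  | succ fuel ih =>
    intro d best hd hfuel hb0 hbc hbt H
    by_cases hcond : d * d ≤ t
    · rw [divLoop, if_pos hcond]
      by_cases hdvd : PySem.Int.mod t d = 0
      · have hddvd : d ∣ t := (PySem.Int.mod_eq_zero_iff_dvd t d).mp hdvd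
        simp only [hdvd]
        set q := PySem.Int.floordiv t d with hqdef
        have hq : q = t / d := by rw [hqdef, PySem.Int.floordiv_eq_ediv_of_pos hd]
        have hqd : d ≤ q := by
          rw [hq]; exact (Int.le_ediv_iff_mul_le hd).mpr hcond
        have hq0 : 0 < q := lt_of_lt_of_le hd hqd
        have htdq : d * q = t := by
          rw [hq, mul_comm]; exact Int.ediv_mul_cancel hddvd
        have hqdvd : q ∣ t := Dvd.intro d (by rw [← htdq]; ring)
        set b2 := if d ≤ c ∧ best < d then d else best with hb2def
        set best1 := if q ≤ c ∧ b2 < q then q else b2 with hbest1def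
        have hb2_ge : best ≤ b2 := by
          rw [hb2def]; split_ifs with h' <;> omega
        have hbest1_ge : b2 ≤ best1 := by
          rw [hbest1def]; split_ifs with h' <;> omega
        have hb2_pos : 0 < b2 := lt_of_lt_of_le hb0 hb2_ge
        have hb2_le : b2 ≤ c := by
          rw [hb2def]; split_ifs with h' <;> [exact h'.1; exact hbc]
        have hb2_dvd : b2 ∣ t := by
          rw [hb2def]; split_ifs with h' <;> [exact hddvd; exact hbt]
        have hbest1_pos : 0 < best1 := lt_of_lt_of_le hb2_pos hbest1_ge
        have hbest1_le : best1 ≤ c := by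
          rw [hbest1def]; split_ifs with h' <;> [exact h'.1; exact hb2_le]
        have hbest1_dvd : best1 ∣ t := by
          rw [hbest1def]; split_ifs with h' <;> [exact hqdvd; exact hb2_dvd]
        have hd_le_best1 : d ≤ c → d ≤ best1 := by
          intro hdc
          have : d ≤ b2 := by rw [hb2def]; split_ifs with h' <;> omega
          omega
        have hq_le_best1 : q ≤ c → q ≤ best1 := by
          intro hqc
          rw [hbest1def]; split_ifs with h' <;> omega
        apply ih (d + 1) best1 (by omega) (by omega) hbest1_pos hbest1_le hbest1_dvd
        intro j hj0 hjc hjt hcase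
        by_cases hold : j < d ∨ t / j < d
        · exact le_trans (H j hj0 hjc hjt hold) (le_trans hb2_ge hbest1_ge)
        · push_neg at hold
          rcases hcase with h' | h'
          · have hjd : j = d := by omega
            exact hjd ▸ hd_le_best1 (hjd ▸ hjc)
          · have htj : t / j = d := by omega
            have hjq : j = q := by
              have hdj : d * j = t := by
                have := Int.ediv_mul_cancel hjt
                rw [htj] at this; exact this
              rw [hq, ← hdj]
              exact (Int.mul_ediv_cancel_left j (by omega)).symm
            exact hjq ▸ hq_le_best1 (hjq ▸ hjc)
      · simp only [hdvd]
        have hdndvd : ¬ d ∣ t := fun h => hdvd ((PySem.Int.mod_eq_zero_iff_dvd t d).mpr h)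
        simp only [beq_iff_eq, if_neg hdvd]
        apply ih (d + 1) best (by omega) (by omega) hb0 hbc hbt
        intro j hj0 hjc hjt hcase
        apply H j hj0 hjc hjt
        by_cases hold : j < d ∨ t / j < d
        · exact hold
        · push_neg at hold
          exfalso
          rcases hcase with h' | h'
          · have : j = d := by omega
            exact hdndvd (this ▸ hjt)
          · have htj : t / j = d := by omega
            have hdj : d * j = t := by
              have := Int.ediv_mul_cancel hjt
              rw [htj] at this; exact this
            exact hdndvd ⟨j, hdj.symm⟩
    · rw [divLoop, if_neg hcond]
      refine ⟨hb0, hbc, hbt, fun j hj0 hjc hjt => ?_⟩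
      apply H j hj0 hjc hjt
      by_cases hjd : j < d
      · exact Or.inl hjd
      · push_neg at hjd
        right
        by_contra hge
        push_neg at hge
        have hjt' : j * (t / j) = t := by
          rw [mul_comm]; exact Int.ediv_mul_cancel hjt
        have : d * d ≤ j * (t / j) :=
          mul_le_mul hjd hge (by omega) (by omega)
        omega

theorem core_split_eq_largest_divisor (s c : Int) : core_split s c = largest_divisor s c := by
  by_cases hc : c ≤ 0
  · rw [largest_divisor, if_pos hc]
    have h0 : c.toNat = 0 := by omega
    rw [core_split, h0]
    rfl
  · push_neg at hc
    rw [largest_divisor, if_neg (by omega)]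
    by_cases hs : s = 0
    · subst hs
      simp only [if_pos rfl]
      have hmod : PySem.Int.mod 0 c = 0 := (PySem.Int.mod_eq_zero_iff_dvd 0 c).mpr (dvd_zero c)
      have h1 : c.toNat = (c.toNat - 1) + 1 := by omega
      rw [core_split, h1]
      simp [coreSplitLoop, hc, hmod]
    · -- t = |s|
      set t := if s < 0 then -s else s with htdef
      have htabs : t = |s| := by rw [htdef]; rcases lt_or_ge s 0 with h | h <;> simp [abs_of_neg, abs_of_nonneg, h] <;> omega
      have ht0 : 0 < t := by rw [htabs]; exact abs_pos.mpr hs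
      have htne : ¬ t = 0 := by omega
      simp only [if_neg hs, if_neg htne]
      have hdvd_iff : ∀ j : Int, j ∣ t ↔ j ∣ s := by
        intro j; rw [htabs]; exact dvd_abs j s
      by_cases htc : t ≤ c
      · rw [if_pos htc]
        rw [core_split]
        apply cs_desc s t ht0 ((PySem.Int.mod_eq_zero_iff_dvd s t).mpr ((hdvd_iff t).mp dvd_rfl)) (c - t).toNat c (by omega)
        intro j h1 h2 hmod
        have hjs : j ∣ s := (PySem.Int.mod_eq_zero_iff_dvd s j).mp hmod
        have : j ≤ t := Int.le_of_dvd ht0 ((hdvd_iff j).mpr hjs)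
        omega
      · rw [if_neg htc]
        push_neg at htc
        have H0 : ∀ j, 0 < j → j ≤ c → j ∣ t → (j < 1 ∨ t / j < 1) → j ≤ 1 := by
          intro j hj0 hjc hjt hcase
          exfalso
          rcases hcase with h' | h'
          · omega
          · have h1j : 1 * j ≤ t := by
              have := Int.le_of_dvd ht0 hjt; omega
            have : 1 ≤ t / j := (Int.le_ediv_iff_mul_le hj0).mpr h1j
            omega
        obtain ⟨hb0, hbc, hbt, hmax⟩ :=
          divLoop_spec t c ht0 hc (t.toNat + 1) 1 1 (by omega) (by omega) (by omega) (by omega) (one_dvd t) H0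
        rw [core_split]
        apply cs_desc s _ hb0 ((PySem.Int.mod_eq_zero_iff_dvd s _).mpr ((hdvd_iff _).mp hbt)) (c - divLoop t c (t.toNat + 1) 1 1).toNat c (by omega)
        intro j h1 h2 hmod
        have hjs : j ∣ s := (PySem.Int.mod_eq_zero_iff_dvd s j).mp hmod
        have := hmax j (by omega) h2 ((hdvd_iff j).mpr hjs)
        omega

theorem set_map_range (n : Nat) (d : PySem.Dict Int Int) (i v : Int) (h0 : 0 ≤ i) (hn : i < (n : Int)) :
    PySem.List.pySetD ((PySem.List.pyRange 0 (n : Int) 1).map (fun j => d.getD j 1)) i v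
      = (PySem.List.pyRange 0 (n : Int) 1).map (fun j => (d.insert i v).getD j 1) := by
  rw [PySem.List.pySetD_of_nonneg _ v h0]
  apply List.ext_getElem
  · simp [PySem.List.length_pyRange_one]
  · intro k hk1 hk2
    simp only [List.length_set, List.length_map, PySem.List.length_pyRange_one] at hk1
    have hkn : k < n := by omega
    rw [List.getElem_set]
    simp only [List.getElem_map, PySem.List.getElem_pyRange_one]
    have hrange : ((0:Int) + k) = (k : Int) := by omega
    rw [hrange, PySem.Dict.getD_insert]
    by_cases he : k = i.toNat
    · have hki : (k : Int) = i := by omega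
      simp [he, hki]
      exact fun hlt => absurd hlt (by omega)
    · have hki : ¬ ((k : Int) = i) := by omega
      simp [hki]
      intro h
      exact absurd h.symm he

theorem loop_eq (sizes : List Int) (f : Int → Int × Int × Int)
    (hf : ∀ i, (f i).1 = i ∧ (f i).2.1 = PySem.List.pyGetD sizes i 0) :
    ∀ (order : List Int), (∀ i ∈ order, 0 ≤ i ∧ i < (sizes.length : Int)) →
    ∀ (d : PySem.Dict Int Int) (rem : Int),
      (aLoop (order.map f) ((PySem.List.pyRange 0 (sizes.length : Int) 1).map (fun i => d.getD i 1)) rem).1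
        = (PySem.List.pyRange 0 (sizes.length : Int) 1).map
            (fun i => (bLoop sizes order d rem).1.getD i 1) := by
  intro order
  induction order with
  | nil => intro _ d rem; simp [aLoop, bLoop]
  | cons i rest ih =>
    intro hmem d rem
    obtain ⟨hi0, hin⟩ := hmem i (by simp)
    have hrest : ∀ j ∈ rest, 0 ≤ j ∧ j < (sizes.length : Int) := fun j hj => hmem j (by simp [hj])
    simp only [List.map_cons, aLoop, bLoop, (hf i).1, (hf i).2,
      core_split_eq_largest_divisor]
    by_cases h1 : rem ≤ 1
    · simp [h1]
    · simp only [h1, if_false]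
      by_cases h2 : 1 < largest_divisor (PySem.List.pyGetD sizes i 0) rem
      · simp only [h2, if_true]
        rw [set_map_range sizes.length d i _ hi0 hin]
        exact ih hrest _ _
      · simp only [h2, if_false]
        exact ih hrest _ _

theorem multi_dim_core_split_spec : Claim_equal_multi_dim_core_split := by
  intro sizes mc pri _ _
  unfold Spec_multi_dim_core_split multi_dim_core_split multi_dim_core_split_alt
  by_cases hnil : sizes = []
  · simp [hnil]
  · simp only [if_neg hnil, PySem.List.len_eq]
    have hsplits : PySem.List.pyRepeat [(1:Int)] (sizes.length : Int)
        = (PySem.List.pyRange 0 (sizes.length : Int) 1).map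
            (fun i => (PySem.Dict.empty : PySem.Dict Int Int).getD i 1) := by
      rw [PySem.List.pyRepeat_singleton]
      apply List.ext_getElem
      · simp [PySem.List.length_pyRange_one]
      · intro k h1 h2
        simp [PySem.Dict.getD_empty]
    rw [sorted2_map (fun i => (i, PySem.List.pyGetD sizes i 0, PySem.List.pyGetD (pri.getD sizes) i 0))
          (fun i => PySem.List.pyGetD (pri.getD sizes) i 0) (fun i => PySem.List.pyGetD sizes i 0)
          (fun x => x.2.2) (fun x => x.2.1) (fun a => rfl) (fun a => rfl), hsplits]
    apply loop_eq
    · intro i; exact ⟨rfl, rfl⟩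
    · intro i hi
      have hidx := (PySem.List.sorted2_perm _ _ _ true).mem_iff.mp hi
      have hrange := (List.mem_filter.mp hidx).1
      have := (PySem.List.mem_pyRange_one).mp hrange
      exact ⟨this.1, this.2⟩
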